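-- pv_equiv track=rewrite | github.com/NoisNette/Codesignal-solutions | chessBoardSquaresUnderQueenAttack.py | chessBoardSquaresUnderQueenAttack
-- ===== SOURCE A (Python) =====
-- def chessBoardSquaresUnderQueenAttack(a, b):
--
--     def go(x, y, dx, dy):
--         if x < 0 or x >= a or y < 0 or y >= b:
--             return 0
--         return go(x + dx, y + dy, dx, dy) + 1
--
--     res = 0
--
--     for i in range(a):
--         for j in range(b):
--             for dx in range(-1, 2):
--                 for dy in range(-1, 2):
--                     if dx != 0 or dy != 0:
--                         res += go(i, j, dx, dy) - 1
--
--     return res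
-- ===== SOURCE B (Python) =====
-- def chessBoardSquaresUnderQueenAttack(a, b):
--     res = 0
--     for i in range(a):
--         for j in range(b):
--             res += (a - 1) + (b - 1) \
--                 + min(i, j) + min(i, b - 1 - j) \
--                 + min(a - 1 - i, j) + min(a - 1 - i, b - 1 - j)
--     return res
-- ===== Notes on version B (the rewrite author's own statement) =====
-- stated objective: faster
-- what changed: Replaced the per-direction recursive ray walk (8 recursions per cell) by a per-cell O(1) distance-to-edge closed form: row/column contribute (a-1)+(b-1) and each diagonal contributes the min of the distances to the two relevant edges.
import Mathlib
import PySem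

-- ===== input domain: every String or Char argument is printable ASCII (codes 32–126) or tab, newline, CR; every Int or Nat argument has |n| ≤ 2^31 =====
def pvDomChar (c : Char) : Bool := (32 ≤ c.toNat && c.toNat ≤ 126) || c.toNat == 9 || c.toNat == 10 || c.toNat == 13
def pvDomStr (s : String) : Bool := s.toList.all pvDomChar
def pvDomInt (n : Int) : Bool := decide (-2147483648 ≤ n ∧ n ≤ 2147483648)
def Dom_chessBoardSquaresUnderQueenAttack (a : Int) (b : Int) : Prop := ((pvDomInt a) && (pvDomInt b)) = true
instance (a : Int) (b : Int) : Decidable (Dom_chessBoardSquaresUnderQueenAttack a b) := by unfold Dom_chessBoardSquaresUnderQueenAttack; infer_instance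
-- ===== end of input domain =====

-- B replaces A's 8 recursive ray walks per cell by a per-cell O(1) distance-to-edge formula (asymptotically faster, O(a*b) vs O(a*b*(a+b))).

-- ===== PORT A =====
-- `go` of A: recursion along a ray; fuel (a+b).toNat+1 is a totality guard only,
-- always sufficient for the in-bounds starts and nonzero directions A uses.
def goA (a b : Int) : Nat → Int → Int → Int → Int → Int
  | 0, _, _, _, _ => 0
  | f + 1, x, y, dx, dy =>
    if x < 0 ∨ x ≥ a ∨ y < 0 ∨ y ≥ b then 0
    else goA a b f (x + dx) (y + dy) dx dy + 1

def chessBoardSquaresUnderQueenAttack (a : Int) (b : Int) : Int :=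
  (PySem.List.pyRange 0 a 1).foldl (fun res i =>
    (PySem.List.pyRange 0 b 1).foldl (fun res j =>
      (PySem.List.pyRange (-1) 2 1).foldl (fun res dx =>
        (PySem.List.pyRange (-1) 2 1).foldl (fun res dy =>
          if dx ≠ 0 ∨ dy ≠ 0 then res + (goA a b ((a + b).toNat + 1) i j dx dy - 1) else res)
          res) res) res) 0

-- ===== PORT B =====
def chessBoardSquaresUnderQueenAttack_alt (a : Int) (b : Int) : Int :=
  (PySem.List.pyRange 0 a 1).foldl (fun res i =>
    (PySem.List.pyRange 0 b 1).foldl (fun res j =>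
      res + ((a - 1) + (b - 1) + min i j + min i (b - 1 - j)
        + min (a - 1 - i) j + min (a - 1 - i) (b - 1 - j))) res) 0

-- ===== PRECONDITION & SPEC =====
-- Pre_ excludes exactly the inputs on which Python A raises RecursionError: non-empty
-- boards (a ≥ 1 and b ≥ 1) with a side ≥ 998, where go's recursion exceeds Python's limit.
def Pre_chessBoardSquaresUnderQueenAttack (a : Int) (b : Int) : Prop :=
  a ≤ 0 ∨ b ≤ 0 ∨ (a ≤ 997 ∧ b ≤ 997)
instance (a : Int) (b : Int) : Decidable (Pre_chessBoardSquaresUnderQueenAttack a b) := by unfold Pre_chessBoardSquaresUnderQueenAttack; infer_instance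
def pvWitness_chessBoardSquaresUnderQueenAttack : Int × Int := (8, 8)

def Spec_chessBoardSquaresUnderQueenAttack (a : Int) (b : Int) (out : Int) : Prop := out = chessBoardSquaresUnderQueenAttack_alt a b
instance (a : Int) (b : Int) (out : Int) : Decidable (Spec_chessBoardSquaresUnderQueenAttack a b out) := by unfold Spec_chessBoardSquaresUnderQueenAttack; infer_instance

-- ===== CLAIM (what is proved, stated in full; the proofs are below) =====
def Claim_equal_chessBoardSquaresUnderQueenAttack : Prop := ∀ (a : Int) (b : Int), Dom_chessBoardSquaresUnderQueenAttack a b → Pre_chessBoardSquaresUnderQueenAttack a b → Spec_chessBoardSquaresUnderQueenAttack a b (chessBoardSquaresUnderQueenAttack a b)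

-- ===== LEMMAS AND PROOFS =====

-- the value go returns from an in-bounds start: min of the step counts to the two relevant edges
def mval (a b x y dx dy : Int) : Int :=
  min (if dx = 1 then a - x else if dx = -1 then x + 1 else a + b)
      (if dy = 1 then b - y else if dy = -1 then y + 1 else a + b)

lemma goA_out (a b : Int) (f : Nat) (x y dx dy : Int)
    (h : x < 0 ∨ x ≥ a ∨ y < 0 ∨ y ≥ b) : goA a b f x y dx dy = 0 := by
  cases f <;> simp [goA, h]

lemma goA_count (a b dx dy : Int)
    (hdx : dx = -1 ∨ dx = 0 ∨ dx = 1) (hdy : dy = -1 ∨ dy = 0 ∨ dy = 1)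
    (hne : ¬(dx = 0 ∧ dy = 0)) :
    ∀ (f : Nat) (x y : Int), 0 ≤ x → x < a → 0 ≤ y → y < b →
      mval a b x y dx dy ≤ (f : Int) →
      goA a b f x y dx dy = mval a b x y dx dy := by
  intro f
  induction f with
  | zero =>
    intro x y hx0 hxa hy0 hyb hf
    exfalso
    rcases hdx with rfl | rfl | rfl <;> rcases hdy with rfl | rfl | rfl <;>
      simp [mval] at hf ⊢ <;> omega
  | succ f ih =>
    intro x y hx0 hxa hy0 hyb hf
    have hin : ¬(x < 0 ∨ x ≥ a ∨ y < 0 ∨ y ≥ b) := by omega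
    rw [goA, if_neg hin]
    by_cases hnext : 0 ≤ x + dx ∧ x + dx < a ∧ 0 ≤ y + dy ∧ y + dy < b
    · rw [ih (x + dx) (y + dy) hnext.1 hnext.2.1 hnext.2.2.1 hnext.2.2.2
        (by rcases hdx with rfl | rfl | rfl <;> rcases hdy with rfl | rfl | rfl <;>
          simp [mval] at hf ⊢ <;> omega)]
      rcases hdx with rfl | rfl | rfl <;> rcases hdy with rfl | rfl | rfl <;>
        simp [mval] <;> omega
    · rw [goA_out a b f _ _ _ _ (by omega)]
      rcases hdx with rfl | rfl | rfl <;> rcases hdy with rfl | rfl | rfl <;>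
        (try exact absurd ⟨rfl, rfl⟩ hne) <;> simp [mval] <;> omega

lemma pyRange_dirs : PySem.List.pyRange (-1) 2 1 = [-1, 0, 1] := by decide

lemma cell_eq (a b i j : Int) (hi0 : 0 ≤ i) (hia : i < a) (hj0 : 0 ≤ j) (hjb : j < b)
    (r : Int) :
    (PySem.List.pyRange (-1) 2 1).foldl (fun res dx =>
      (PySem.List.pyRange (-1) 2 1).foldl (fun res dy =>
        if dx ≠ 0 ∨ dy ≠ 0 then res + (goA a b ((a + b).toNat + 1) i j dx dy - 1) else res)
        res) r
    = r + ((a - 1) + (b - 1) + min i j + min i (b - 1 - j)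
        + min (a - 1 - i) j + min (a - 1 - i) (b - 1 - j)) := by
  have hfuel : ∀ dx dy, dx = -1 ∨ dx = 0 ∨ dx = 1 → dy = -1 ∨ dy = 0 ∨ dy = 1 →
      ¬(dx = 0 ∧ dy = 0) →
      goA a b ((a + b).toNat + 1) i j dx dy = mval a b i j dx dy := by
    intro dx dy hdx hdy hne
    refine goA_count a b dx dy hdx hdy hne _ i j hi0 hia hj0 hjb ?_
    rcases hdx with rfl | rfl | rfl <;> rcases hdy with rfl | rfl | rfl <;>
      simp [mval] <;> omega
  rw [pyRange_dirs]
  simp only [List.foldl]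
  rw [hfuel (-1) (-1) (by norm_num) (by norm_num) (by norm_num),
      hfuel (-1) 0 (by norm_num) (by norm_num) (by norm_num),
      hfuel (-1) 1 (by norm_num) (by norm_num) (by norm_num),
      hfuel 0 (-1) (by norm_num) (by norm_num) (by norm_num),
      hfuel 0 1 (by norm_num) (by norm_num) (by norm_num),
      hfuel 1 (-1) (by norm_num) (by norm_num) (by norm_num),
      hfuel 1 0 (by norm_num) (by norm_num) (by norm_num),
      hfuel 1 1 (by norm_num) (by norm_num) (by norm_num)]
  simp [mval]
  omega

-- ===== VERDICT (by name: the statement is the Claim_ definition above) =====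
theorem chessBoardSquaresUnderQueenAttack_spec : Claim_equal_chessBoardSquaresUnderQueenAttack := by
  intro a b _ _
  unfold Spec_chessBoardSquaresUnderQueenAttack
  unfold chessBoardSquaresUnderQueenAttack chessBoardSquaresUnderQueenAttack_alt
  apply PySem.List.foldl_congr_mem
  intro acc i hi
  rw [PySem.List.mem_pyRange_one] at hi
  apply PySem.List.foldl_congr_mem
  intro acc' j hj
  rw [PySem.List.mem_pyRange_one] at hj
  exact cell_eq a b i j hi.1 hi.2 hj.1 hj.2 acc'
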